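-- pv_equiv track=rewrite | github.com/wesleylether/advent-of-code-python | 2024/09.py | max_adjacent_none
-- ===== SOURCE A (Python) =====
-- def max_adjacent_none(lst):
--     max_count = 0
--     current_count = 0
--
--     for item in lst:
--         if item is None:
--             current_count += 1
--         else:
--             max_count = max(max_count, current_count)
--             current_count = 0
--
--     return max_count
-- ===== SOURCE B (Python) =====
-- def max_adjacent_none(lst):
--     positions = [i for i, x in enumerate(lst) if x is not None]
--     best = 0
--     prev = -1
--     for pos in positions:
--         best = max(best, pos - prev - 1)
--         prev = pos
--     return best
-- ===== Notes on version B (the rewrite author's own statement) =====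
-- stated objective: alternative
-- what changed: Instead of one running counter reset on each non-None item, B first collects the indices of non-None elements and then takes the maximum gap between consecutive such indices (starting from prev = -1), which inherently never counts a trailing None run, matching A.
import Mathlib
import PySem

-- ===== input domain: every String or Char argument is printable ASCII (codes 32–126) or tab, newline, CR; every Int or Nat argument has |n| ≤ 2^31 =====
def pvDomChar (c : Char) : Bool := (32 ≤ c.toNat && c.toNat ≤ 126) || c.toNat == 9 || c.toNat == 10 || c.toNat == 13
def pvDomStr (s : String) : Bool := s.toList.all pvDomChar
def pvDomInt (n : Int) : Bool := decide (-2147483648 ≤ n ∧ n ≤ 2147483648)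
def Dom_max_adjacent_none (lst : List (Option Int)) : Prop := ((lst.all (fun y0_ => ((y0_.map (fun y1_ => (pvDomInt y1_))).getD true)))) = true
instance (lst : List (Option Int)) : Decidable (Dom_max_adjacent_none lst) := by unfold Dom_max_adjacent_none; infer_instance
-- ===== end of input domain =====

-- B collects the indices of the non-None elements and takes the maximum gap between
-- consecutive such indices (objective: alternative decomposition, same cost).

-- ===== PORT A =====
-- one pass, running counter reset on each non-None item
def max_adjacent_none (lst : List (Option Int)) : Int :=
  (lst.foldl
    (fun (s : Int × Int) item =>
      match item with
      | none => (s.1, s.2 + 1)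
      | some _ => (max s.1 s.2, 0))
    (0, 0)).1

-- ===== PORT B =====
-- positions = [i for i, x in enumerate(lst) if x is not None]; then max gap scan
def max_adjacent_none_alt (lst : List (Option Int)) : Int :=
  let positions : List Int :=
    (PySem.List.enumerate lst).filterMap
      (fun p => if p.2.isSome then some p.1 else none)
  (positions.foldl
    (fun (s : Int × Int) pos => (max s.1 (pos - s.2 - 1), pos))
    (0, -1)).1

-- ===== PRECONDITION & SPEC =====
def Spec_max_adjacent_none (lst : List (Option Int)) (out : Int) : Prop := out = max_adjacent_none_alt lst
instance (lst : List (Option Int)) (out : Int) : Decidable (Spec_max_adjacent_none lst out) := by unfold Spec_max_adjacent_none; infer_instance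

-- ===== CLAIM (what is proved, stated in full; the proofs are below) =====
def Claim_equal_max_adjacent_none : Prop := ∀ (lst : List (Option Int)), Dom_max_adjacent_none lst → Spec_max_adjacent_none lst (max_adjacent_none lst)

-- ===== LEMMAS AND PROOFS =====

-- the filterMap over enumerate, starting at index i
def pvPosFrom (i : Int) : List (Option Int) → List Int
  | [] => []
  | none :: t => pvPosFrom (i + 1) t
  | some _ :: t => i :: pvPosFrom (i + 1) t

theorem pvPosFrom_eq (lst : List (Option Int)) (i : Int) :
    (PySem.List.enumerate lst i).filterMap
      (fun p => if p.2.isSome then some p.1 else none) = pvPosFrom i lst := by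
  induction lst generalizing i with
  | nil => simp [PySem.List.enumerate_nil, pvPosFrom]
  | cons h t ih =>
    cases h <;> simp [PySem.List.enumerate_cons, pvPosFrom, ih]

theorem pv_main (lst : List (Option Int)) (i m p : Int) :
    (lst.foldl
      (fun (s : Int × Int) item =>
        match item with
        | none => (s.1, s.2 + 1)
        | some _ => (max s.1 s.2, 0))
      (m, i - p - 1)).1 =
    ((pvPosFrom i lst).foldl
      (fun (s : Int × Int) pos => (max s.1 (pos - s.2 - 1), pos))
      (m, p)).1 := by
  induction lst generalizing i m p with
  | nil => simp [pvPosFrom]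
  | cons h t ih =>
    cases h with
    | none =>
      simp only [List.foldl_cons, pvPosFrom]
      have h1 := ih (i + 1) m p
      simp only [show i + 1 - p - 1 = i - p - 1 + 1 from by ring] at h1
      exact h1
    | some v =>
      simp only [List.foldl_cons, pvPosFrom]
      have h1 := ih (i + 1) (max m (i - p - 1)) i
      simp only [show i + 1 - i - 1 = (0 : Int) from by ring] at h1
      exact h1

-- ===== VERDICT (by name: the statement is the Claim_ definition above) =====
theorem max_adjacent_none_spec : Claim_equal_max_adjacent_none := by
  intro lst _
  show max_adjacent_none lst = max_adjacent_none_alt lst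
  unfold max_adjacent_none max_adjacent_none_alt
  rw [pvPosFrom_eq]
  have := pv_main lst 0 0 (-1)
  norm_num at this ⊢
  exact this
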